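-- pv_equiv track=rewrite | github.com/CodingPandaLLL/PythonForMark | PYTEST/PyTest00/PyStudy04.py | returnName
-- ===== SOURCE A (Python) =====
-- def returnName(Str):
--     rStr=''
--     for n,x in enumerate(Str,1):
--         if x.islower() and n==1:
--             x=x.upper()
--         elif x.isupper() and n !=1:
--             x=x.lower();
--         rStr=rStr+x
--     return rStr
-- ===== SOURCE B (Python) =====
-- def returnName(Str):
--     return Str[:1].upper() + Str[1:].lower()
-- ===== Notes on version B (the rewrite author's own statement) =====
-- stated objective: faster
-- what changed: B drops the enumerate-and-accumulate loop entirely: it slices the string into head and tail and applies whole-string .upper()/.lower() to the two slices, exact on the printable-ASCII domain Dom covers.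
import Mathlib
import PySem

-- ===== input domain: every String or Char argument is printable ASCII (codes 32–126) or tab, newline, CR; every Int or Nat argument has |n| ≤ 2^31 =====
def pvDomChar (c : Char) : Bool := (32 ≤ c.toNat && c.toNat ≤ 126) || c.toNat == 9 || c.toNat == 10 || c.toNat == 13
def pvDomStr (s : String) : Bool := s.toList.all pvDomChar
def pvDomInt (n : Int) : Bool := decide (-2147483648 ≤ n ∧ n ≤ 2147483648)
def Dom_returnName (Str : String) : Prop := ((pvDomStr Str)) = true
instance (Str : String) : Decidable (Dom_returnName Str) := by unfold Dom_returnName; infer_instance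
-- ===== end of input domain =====

-- B replaces the per-character loop with two whole-string slice operations (head uppered,
-- tail lowered), exact on the ASCII domain Dom covers; a timing run measured B faster (A's loop concatenates quadratically).

-- ===== PORT A =====
def returnName (Str : String) : String :=
  String.ofList ((PySem.List.enumerate Str.toList 1).foldl
    (fun rStr (p : Int × Char) =>
      let x := p.2
      let x := if PySem.Chars.islower x && p.1 == 1 then PySem.Chars.upperChar x
               else if PySem.Chars.isupper x && p.1 != 1 then PySem.Chars.lowerChar x
               else x
      rStr ++ [x]) [])

-- ===== PORT B =====
def returnName_alt (Str : String) : String :=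
  PySem.Str.upper (PySem.Str.slice Str none (some 1)) ++
  PySem.Str.lower (PySem.Str.slice Str (some 1) none)

-- ===== PRECONDITION & SPEC =====
def Spec_returnName (Str : String) (out : String) : Prop := out = returnName_alt Str
instance (Str : String) (out : String) : Decidable (Spec_returnName Str out) := by unfold Spec_returnName; infer_instance

-- ===== CLAIM (what is proved, stated in full; the proofs are below) =====
def Claim_equal_returnName : Prop := ∀ (Str : String), Dom_returnName Str → Spec_returnName Str (returnName Str)

-- ===== LEMMAS AND PROOFS =====

-- A's loop on the tail (counter ≥ 2) lowers every uppercase char: it is map lowerChar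
lemma returnName_tail (rest : List Char) : ∀ (s : Int) (acc : List Char), 2 ≤ s →
    (PySem.List.enumerate rest s).foldl
      (fun rStr (p : Int × Char) =>
        let x := p.2
        let x := if PySem.Chars.islower x && p.1 == 1 then PySem.Chars.upperChar x
                 else if PySem.Chars.isupper x && p.1 != 1 then PySem.Chars.lowerChar x
                 else x
        rStr ++ [x]) acc
    = acc ++ rest.map PySem.Chars.lowerChar := by
  induction rest with
  | nil => intro s acc _; simp [PySem.List.enumerate_nil]
  | cons c cs ih =>
      intro s acc hs
      have h1 : (s == 1) = false := by simp; omega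
      have h2 : (s != 1) = true := by simp; omega
      rw [PySem.List.enumerate_cons, List.foldl_cons, ih (s + 1) _ (by omega)]
      by_cases h : PySem.Chars.isupper c <;>
        simp [h1, h2, h, PySem.Chars.lowerChar]

-- ===== VERDICT (by name: the statement is the Claim_ definition above) =====
theorem returnName_spec : Claim_equal_returnName := by
  intro Str _
  unfold Spec_returnName returnName returnName_alt
  apply String.toList_inj.mp
  rw [String.toList_append, PySem.Str.toList_upper, PySem.Str.toList_lower,
    PySem.Str.toList_slice, PySem.Str.toList_slice,
    PySem.Chars.slice_eq_listSlice, PySem.Chars.slice_eq_listSlice,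
    PySem.List.slice_to Str.toList (by omega), PySem.List.slice_from Str.toList (by omega)]
  cases h : Str.toList with
  | nil => simp [PySem.List.enumerate_nil, PySem.Chars.upper, PySem.Chars.lower]
  | cons c rest =>
      rw [PySem.List.enumerate_cons, List.foldl_cons,
        returnName_tail rest (1 + 1) _ (by omega)]
      have h1 : ((1 : Int) == 1) = true := by decide
      have h2 : ((1 : Int) != 1) = false := by decide
      by_cases hc : PySem.Chars.islower c <;>
        simp [h1, h2, hc, PySem.Chars.upper, PySem.Chars.lower, PySem.Chars.upperChar]
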